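-- pv_equiv track=rewrite | github.com/biolab/orange3 | Orange/widgets/visualize/owvenndiagram.py | pairwise
-- ===== SOURCE A (Python) =====
-- def pairwise(iterable):
--     """
--     Return an iterator over consecutive pairs in `iterable`.
--
--     >>> list(pairwise([1, 2, 3, 4])
--     [(1, 2), (2, 3), (3, 4)]
--
--     """
--     it = iter(iterable)
--     try:
--         first = next(it)
--     except StopIteration:
--         return
--     for second in it:
--         yield first, second
--         first = second
-- ===== SOURCE B (Python) =====
-- from itertools import tee
--
-- def pairwise(iterable):
--     """Return an iterator over consecutive pairs in `iterable` (tee recipe)."""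
--     a, b = tee(iterable)
--     next(b, None)
--     return zip(a, b)
-- ===== Notes on version B (the rewrite author's own statement) =====
-- stated objective: idiomatic
-- what changed: Replaced the explicit loop carrying a `first` accumulator (with try/except StopIteration) by the standard itertools.tee recipe: zip over two offset copies of the iterator.
import Mathlib
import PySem

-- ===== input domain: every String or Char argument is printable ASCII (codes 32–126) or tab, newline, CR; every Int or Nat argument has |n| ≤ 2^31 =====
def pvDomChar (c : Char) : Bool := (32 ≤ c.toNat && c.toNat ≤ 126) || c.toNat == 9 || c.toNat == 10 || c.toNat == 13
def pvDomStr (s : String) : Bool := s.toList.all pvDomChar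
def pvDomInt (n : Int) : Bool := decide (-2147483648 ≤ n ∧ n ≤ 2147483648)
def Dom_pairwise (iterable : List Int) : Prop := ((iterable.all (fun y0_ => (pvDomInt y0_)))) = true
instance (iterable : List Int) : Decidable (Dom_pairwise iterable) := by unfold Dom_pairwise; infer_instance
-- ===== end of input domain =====

-- B replaces A's explicit first-accumulator loop by the itertools.tee recipe (zip of two offset copies); idiomatic, same cost.


-- ===== PORT A =====
-- loop: `first` accumulator, for second in it: yield (first, second); first = second
def pairwiseLoop (first : Int) : List Int → List (Int × Int)
  | [] => []
  | second :: rest => (first, second) :: pairwiseLoop second rest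

-- A: `first = next(it)` (empty → return nothing), then the loop over the rest
def pairwise (iterable : List Int) : List (Int × Int) :=
  match iterable with
  | [] => []
  | first :: it => pairwiseLoop first it

-- ===== PORT B =====
-- B: zip of the list with its one-step-advanced tee copy (zip stops at the shorter)
def pairwise_alt (iterable : List Int) : List (Int × Int) :=
  List.zip iterable (iterable.drop 1)

-- ===== PRECONDITION & SPEC =====
def Spec_pairwise (iterable : List Int) (out : List (Int × Int)) : Prop := out = pairwise_alt iterable
instance (iterable : List Int) (out : List (Int × Int)) : Decidable (Spec_pairwise iterable out) := by unfold Spec_pairwise; infer_instance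

-- ===== CLAIM (what is proved, stated in full; the proofs are below) =====
def Claim_equal_pairwise : Prop := ∀ (iterable : List Int), Dom_pairwise iterable → Spec_pairwise iterable (pairwise iterable)

-- ===== LEMMAS AND PROOFS =====

-- ===== VERDICT (by name: the statement is the Claim_ definition above) =====
theorem pairwiseLoop_eq_zip (first : Int) (it : List Int) :
    pairwiseLoop first it = List.zip (first :: it) it := by
  induction it generalizing first with
  | nil => rfl
  | cons s rest ih => simp [pairwiseLoop, ih]

theorem pairwise_spec : Claim_equal_pairwise := by
  intro iterable _
  unfold Spec_pairwise pairwise pairwise_alt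
  cases iterable with
  | nil => rfl
  | cons first it => simp [pairwiseLoop_eq_zip]
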